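-- pv_equiv track=rewrite | github.com/AYashchuk/pythonProject | lesson4/task6.py | numbers_cycle_gen
-- ===== SOURCE A (Python) =====
-- from itertools import count, cycle
--
-- def numbers_cycle_gen(input_list):
--     index = 0
--     res = []
--     for el in cycle(input_list):
--         if index > 10:
--             break
--         res.append(el)
--         index += 1
--     return res
-- ===== SOURCE B (Python) =====
-- def numbers_cycle_gen(input_list):
--     if not input_list:
--         return []
--     n = len(input_list)
--     return [input_list[i % n] for i in range(11)]
-- ===== Notes on version B (the rewrite author's own statement) =====
-- stated objective: idiomatic
-- what changed: Replaces the infinite itertools.cycle consumer with counter and break by a fixed comprehension over range(11) using modular indexing (empty list guarded).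
import Mathlib
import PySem

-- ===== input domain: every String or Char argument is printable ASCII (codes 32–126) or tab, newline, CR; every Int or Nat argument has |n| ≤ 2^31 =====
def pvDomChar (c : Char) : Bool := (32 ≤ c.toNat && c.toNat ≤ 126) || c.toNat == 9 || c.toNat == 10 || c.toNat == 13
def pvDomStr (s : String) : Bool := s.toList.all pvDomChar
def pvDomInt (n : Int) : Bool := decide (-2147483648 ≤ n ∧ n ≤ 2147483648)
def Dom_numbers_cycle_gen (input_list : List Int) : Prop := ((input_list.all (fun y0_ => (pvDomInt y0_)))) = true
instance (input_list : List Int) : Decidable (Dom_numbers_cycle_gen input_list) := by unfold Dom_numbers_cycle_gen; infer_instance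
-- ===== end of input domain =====

-- B replaces the itertools.cycle consumer with counter and break by a fixed
-- comprehension over range(11) with modular indexing (idiomatic; same cost).

-- ===== PORT A =====
-- A's `for el in cycle(input_list)` loop: `rest` is the part of the current pass
-- not yet yielded; when it runs out, cycle restarts from the full list (x :: xt).
-- If input_list is empty, cycle yields nothing and the loop body never runs.
def pvGoA (x : Int) (xt : List Int) (rest : List Int) (index : Nat) (res : List Int) : List Int :=
  if index > 10 then res
  else
    match rest with
    | [] => pvGoA x xt xt (index + 1) (res ++ [x])
    | r :: rs => pvGoA x xt rs (index + 1) (res ++ [r])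
termination_by 11 - index
decreasing_by all_goals omega

def numbers_cycle_gen (input_list : List Int) : List Int :=
  match input_list with
  | [] => []
  | x :: xs => pvGoA x xs (x :: xs) 0 []

-- ===== PORT B =====
-- input_list[i % n] is always in range (0 ≤ i % n < n), so getD's default is never used.
def numbers_cycle_gen_alt (input_list : List Int) : List Int :=
  if input_list.isEmpty then []
  else (List.range 11).map (fun i => input_list.getD (i % input_list.length) 0)

-- ===== PRECONDITION & SPEC =====
def Spec_numbers_cycle_gen (input_list : List Int) (out : List Int) : Prop := out = numbers_cycle_gen_alt input_list
instance (input_list : List Int) (out : List Int) : Decidable (Spec_numbers_cycle_gen input_list out) := by unfold Spec_numbers_cycle_gen; infer_instance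

-- ===== CLAIM (what is proved, stated in full; the proofs are below) =====
def Claim_equal_numbers_cycle_gen : Prop := ∀ (input_list : List Int), Dom_numbers_cycle_gen input_list → Spec_numbers_cycle_gen input_list (numbers_cycle_gen input_list)

-- ===== LEMMAS AND PROOFS =====

-- Invariant of A's loop: from a suffix starting at position p (p ≤ length) with
-- counter k, the loop appends the modular picks L[(p+j) % n] for j < 11 - k.
theorem pvGoA_spec (x : Int) (xt : List Int) :
    ∀ (m k : Nat), 11 - k = m → ∀ (p : Nat), p ≤ xt.length + 1 → ∀ (res : List Int),
      pvGoA x xt ((x :: xt).drop p) k res =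
        res ++ (List.range (11 - k)).map
          (fun j => (x :: xt).getD ((p + j) % (xt.length + 1)) 0) := by
  intro m
  induction m with
  | zero =>
    intro k hk p hp res
    have hk' : k > 10 := by omega
    rw [pvGoA.eq_def]
    simp [hk', Nat.sub_eq_zero_of_le (by omega : 11 ≤ k)]
  | succ m ih =>
    intro k hk p hp res
    have hk' : ¬ k > 10 := by omega
    rw [pvGoA.eq_def]
    simp only [hk', if_false]
    by_cases hpn : p = xt.length + 1
    · subst hpn
      have hdrop : (x :: xt).drop (xt.length + 1) = [] := by
        simp [List.drop_length]
      rw [hdrop]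
      show pvGoA x xt xt (k + 1) (res ++ [x]) = _
      have hih := ih (k + 1) (by omega) 1 (by omega) (res ++ [x])
      simp only [List.drop_succ_cons, List.drop_zero] at hih
      rw [hih]
      have h11 : 11 - k = (11 - (k + 1)) + 1 := by omega
      rw [h11, List.range_succ_eq_map]
      simp only [List.map_cons, List.map_map, List.append_assoc]
      congr 1
      simp only [List.cons_append, List.nil_append]
      congr 1
      · simp
      · congr 1
        funext j
        simp only [Function.comp_apply]
        congr 1
        conv_rhs => rw [show xt.length + 1 + (j + 1) = (xt.length + 1) + (1 + j) from by omega]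
        rw [Nat.add_mod_left]
    · have hplt : p < (x :: xt).length := by simp; omega
      rw [List.drop_eq_getElem_cons hplt]
      show pvGoA x xt (List.drop (p + 1) (x :: xt)) (k + 1) (res ++ [(x :: xt)[p]]) = _
      rw [ih (k + 1) (by omega) (p + 1) (by omega) (res ++ [(x :: xt)[p]])]
      have h11 : 11 - k = (11 - (k + 1)) + 1 := by omega
      rw [h11, List.range_succ_eq_map]
      simp only [List.map_cons, List.map_map, List.append_assoc]
      congr 1
      simp only [List.cons_append, List.nil_append]
      congr 1
      · have hmod : p % (xt.length + 1) = p := Nat.mod_eq_of_lt (by omega)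
        simp only [Nat.add_zero, hmod]
        exact (List.getD_eq_getElem _ _ hplt).symm
      · congr 1
        funext j
        simp only [Function.comp_apply]
        congr 2
        omega

theorem numbers_cycle_gen_spec : Claim_equal_numbers_cycle_gen := by
  intro input_list _
  unfold Spec_numbers_cycle_gen numbers_cycle_gen numbers_cycle_gen_alt
  match input_list with
  | [] => simp
  | x :: xs =>
    have h := pvGoA_spec x xs 11 0 rfl 0 (by omega) []
    simp only [List.drop_zero] at h
    simp [h]
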